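-- pv_equiv track=rewrite | github.com/SoulTree-Lovers/BAEKJOON_new | Silver_I/1105.py | solution
-- ===== SOURCE A (Python) =====
-- def solution(L, R):
--     if len(L) != len(R):
--         return 0
--
--     min_value = 0
--
--     for i in range(len(L)):
--         if L[i] == R[i]:    # and L[i] == '8' 로 묶으면 첫 번째 조건문 false 시 즉시 break하여 끝까지 탐색하지 못함.
--             if L[i] == '8':
--                 min_value += 1
--             else:
--                 pass
--         else:
--             break
--
--     return min_value
-- ===== SOURCE B (Python) =====
-- def solution(L, R):
--     if len(L) != len(R):
--         return 0
--     n = 0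
--     while n < len(L) and L[n] == R[n]:
--         n += 1
--     return L[:n].count('8')
-- ===== Notes on version B (the rewrite author's own statement) =====
-- stated objective: alternative
-- what changed: Replaces A's single fused for-loop (break-and-count with an accumulator) with a two-stage decomposition: an index-advancing while loop that finds the common-prefix boundary n, then a separate count of '8' in the slice L[:n].
import Mathlib
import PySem

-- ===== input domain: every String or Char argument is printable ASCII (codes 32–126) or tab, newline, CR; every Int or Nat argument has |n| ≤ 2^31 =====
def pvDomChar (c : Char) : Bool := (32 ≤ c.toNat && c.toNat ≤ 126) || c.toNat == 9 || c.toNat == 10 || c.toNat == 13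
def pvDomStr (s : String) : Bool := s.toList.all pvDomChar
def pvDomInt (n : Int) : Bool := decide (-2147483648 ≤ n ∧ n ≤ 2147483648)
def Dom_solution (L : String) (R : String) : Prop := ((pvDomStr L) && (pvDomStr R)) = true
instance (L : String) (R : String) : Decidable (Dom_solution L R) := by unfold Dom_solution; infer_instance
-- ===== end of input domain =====

-- B changes the decomposition only: a while loop finds the common-prefix boundary, then '8' is counted on that slice; same cost, no behaviour change.

-- ===== PORT A =====
-- A's for-loop over i in range(len(L)): compare L[i] with R[i] in lockstep, add 1 on a matching '8', break on mismatch.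
def solutionLoop : List Char → List Char → Int → Int
  | a :: as, b :: bs, acc =>
      if a = b then
        if a = '8' then solutionLoop as bs (acc + 1) else solutionLoop as bs acc
      else acc
  | _, _, acc => acc

def solution (L : String) (R : String) : Int :=
  if PySem.Str.len L ≠ PySem.Str.len R then 0
  else solutionLoop L.toList R.toList 0

-- ===== PORT B =====
-- B's while loop: advance index n while n < len(L) and L[n] == R[n]
def boundary (L : List Char) (R : List Char) (n : Nat) : Nat :=
  if h : n < L.length ∧ L[n]? = R[n]? then boundary L R (n + 1) else n
  termination_by L.length - n
  decreasing_by omega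

def solution_alt (L : String) (R : String) : Int :=
  if PySem.Str.len L ≠ PySem.Str.len R then 0
  else ((L.toList.take (boundary L.toList R.toList 0)).count '8' : Int)

-- ===== PRECONDITION & SPEC =====
def Spec_solution (L : String) (R : String) (out : Int) : Prop := out = solution_alt L R
instance (L : String) (R : String) (out : Int) : Decidable (Spec_solution L R out) := by unfold Spec_solution; infer_instance

-- ===== CLAIM (what is proved, stated in full; the proofs are below) =====
def Claim_equal_solution : Prop := ∀ (L : String) (R : String), Dom_solution L R → Spec_solution L R (solution L R)

-- ===== LEMMAS AND PROOFS =====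
-- proof-only helper: length of the common prefix, structurally
def prefLen : List Char → List Char → Nat
  | a :: as, b :: bs => if a = b then prefLen as bs + 1 else 0
  | _, _ => 0

lemma boundary_eq (L R : List Char) (n : Nat) :
    boundary L R n = n + prefLen (L.drop n) (R.drop n) := by
  rw [boundary]
  split
  · rename_i h
    obtain ⟨hn, heq⟩ := h
    have hLd : L.drop n = L[n] :: L.drop (n + 1) := List.drop_eq_getElem_cons hn
    have hR : n < R.length := by
      by_contra hc
      simp [List.getElem?_eq_none (le_of_not_gt hc), List.getElem?_eq_getElem hn] at heq
    have hRd : R.drop n = R[n] :: R.drop (n + 1) := List.drop_eq_getElem_cons hR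
    have hab : L[n] = R[n] := by
      simpa [List.getElem?_eq_getElem hn, List.getElem?_eq_getElem hR] using heq
    rw [boundary_eq L R (n + 1), hLd, hRd, prefLen, if_pos hab]
    omega
  · rename_i h
    rcases Decidable.not_and_iff_not_or_not.mp h with hn | heq
    · have : L.length ≤ n := le_of_not_gt hn
      simp [List.drop_eq_nil_of_le this, prefLen]
    · by_cases hn : n < L.length
      · have hLd : L.drop n = L[n] :: L.drop (n + 1) := List.drop_eq_getElem_cons hn
        by_cases hR : n < R.length
        · have hRd : R.drop n = R[n] :: R.drop (n + 1) := List.drop_eq_getElem_cons hR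
          have hab : L[n] ≠ R[n] := by
            intro hc
            exact heq (by simp [List.getElem?_eq_getElem hn, List.getElem?_eq_getElem hR, hc])
          rw [hLd, hRd, prefLen, if_neg hab]
          omega
        · rw [List.drop_eq_nil_of_le (le_of_not_gt hR), hLd]
          simp [prefLen]
      · simp [List.drop_eq_nil_of_le (le_of_not_gt hn), prefLen]
  termination_by L.length - n
  decreasing_by omega

lemma solutionLoop_eq (as bs : List Char) (acc : Int) :
    solutionLoop as bs acc = acc + ((as.take (prefLen as bs)).count '8' : Int) := by
  induction as generalizing bs acc with
  | nil => cases bs <;> simp [solutionLoop, prefLen]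
  | cons a as ih =>
    cases bs with
    | nil => simp [solutionLoop, prefLen]
    | cons b bs =>
      by_cases hab : a = b
      · subst hab
        by_cases h8 : a = '8'
        · simp [solutionLoop, prefLen, h8, ih]
          ring
        · simp [solutionLoop, prefLen, h8, ih]
      · simp [solutionLoop, prefLen, hab]

-- ===== VERDICT (by name: the statement is the Claim_ definition above) =====
theorem solution_spec : Claim_equal_solution := by
  intro L R _
  unfold Spec_solution solution solution_alt
  split
  · rfl
  · rw [solutionLoop_eq, boundary_eq]; simp
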